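-- pv_equiv track=rewrite | github.com/LazareLive/AutomatedDices | Automated Dice/Dice_Script.py | sequenceNumberBipyramidalDice
-- ===== SOURCE A (Python) =====
-- import math
--
-- def isEven(n):
--     return ((n % 2) == 0)
--
-- def recursiveDiceNumberSequence(order):
--     #There are several "notable" sequences that we will use for the dice number sequence. They are called triad,
--     #tetrad and pentad. As order cannot be less than 3, we will only use these sequences to generate any dice.
--     #The goal will be to divide the number of faces until we can find a sequence. These sequences are generated by
--     #using various calculations on the classic dices.
--     #Tetrad case - Taken on the D3 and D6 dequences
--     if(order == 3):
--         return [3, 1, 2]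
--     #Tetrad case - Taken on the D8 sequence
--     elif(order == 4):
--         return [4, 1, 3, 2]
--     #Pentad case - Taken on the D10 sequence -- to be checked. This does not feel right
--     elif(order == 5):
--         return [5, 1, 4, 2, 3]
--     #For any other cases : use recursion until we find a n-ad sequence
--     newOrder = math.trunc(order / 2)
--     recursiveSequence = recursiveDiceNumberSequence(newOrder)
--     #As the recursiveSequence will send half of the information, creation of a new array
--     numberSequence = [0] * order
--     if(isEven(order)):
--         #On the case of an even order dice, check witch method to use based on the last recursion sequence
--         for i in range(newOrder):
--                 #Generate the even-numbers on one polar side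
--                 numberSequence[i] = recursiveSequence[i] * 2
--                 #Generate the odd_numbers on the other side
--                 if(isEven(newOrder)):
--                     #On the even-even case, the last sequence is repeated to generate the current order
--                     numberSequence[newOrder + i] = numberSequence[i] - 1
--                 else:
--                     #On the even-odd case, the last sequence must be inverted to have a weak-strong alternance
--                     numberSequence[newOrder + i] = ((newOrder - recursiveSequence[i] + 1) * 2) - 1
--     else:
--         #On the case of an odd dice order, generate the dice following these rules
--         #Placement of the first number
--         numberSequence[0] = order
--         #Placement of the recursive sequence
--         for i in range(newOrder):
--             #Generation of the even numbers on a polar side of the order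
--             numberSequence[i + 1] = recursiveSequence[newOrder - i - 1] * 2
--             #Generation of the odd numbers
--             numberSequence[order - (i + 1)] = order - numberSequence[i + 1]
--     #Return the number sequence at the end
--     return numberSequence
--
-- def diceNumberAlgorithmSequence(faces):
--     #First: check the number of asked faces. Cannot be less than 3.
--     if(faces < 3):
--         return [(i + 1) for i in range(faces)]
--     #If the number of faces is 4, a specific array must be returned as this cannot be created by the algorithm, and this is
--     #the only solution for a 4 sided die
--     if(faces == 4):
--         return [4, 2, 1, 3]
--     #In all other cases, we need to check whereas the die is even or odd
--     if(isEven(faces)):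
--         #If it is even, the generation will follow the standard dice number sequence generation as the opposite sides must be
--         #equal to the number of the die faces plus one.
--         #Calculation of the even number sequence
--         evenFaces = math.trunc(faces / 2)
--         numberSequenceOrder = recursiveDiceNumberSequence(evenFaces)
--         for i in range(evenFaces):
--             #For each even number generated (NSO multiplied by 2)
--             numberSequenceOrder[i] = numberSequenceOrder[i] * 2
--             #Creation of the opposite side of the die
--             numberSequenceOrder.append(faces - numberSequenceOrder[i] + 1)
--         return numberSequenceOrder
--     else:
--         #If it is odd, the generation is automatically created by the recursion
--         return recursiveDiceNumberSequence(faces)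
--     #In case of a problem, always send zero
--     return [0]
--
-- def sequenceNumberBipyramidalDice(faces):
--     #Get the sequence based on the number of faces
--     sequenceOrder = diceNumberAlgorithmSequence(faces)
--     #If the number of faces is 10, replace 10 with 0
--     if (faces == 10):
--         tenPosition = sequenceOrder.index(10)
--         sequenceOrder[tenPosition] = 0
--     #Generate the bipyramidal sequence
--     bipyramidalSequence = [0] * faces
--     #Calcul the base polygon sides
--     polygonSides = math.trunc(faces/2)
--     for i in range(0, polygonSides):
--         #First half of the sequence stays
--         bipyramidalSequence[i] = sequenceOrder[i]
--         #Of the odd numbers, need to invert the sequence except for the first one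
--         position = ((i * (-1)) % polygonSides) + polygonSides
--         bipyramidalSequence[position] = sequenceOrder[i + polygonSides]
--     return bipyramidalSequence
-- ===== SOURCE B (Python) =====
-- import math
--
-- _BASE = {3: [3, 1, 2], 4: [4, 1, 3, 2], 5: [5, 1, 4, 2, 3]}
--
-- def _coreSequence(order):
--     # Iterative bottom-up version of the recursive number-sequence generator:
--     # collect the chain of orders by halving down to a base case, then rebuild upward.
--     chain = []
--     while order > 5:
--         chain.append(order)
--         order //= 2
--     seq = _BASE[order]
--     for o in reversed(chain):
--         half = o // 2
--         evens = [x * 2 for x in seq]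
--         if o % 2 == 0:
--             if half % 2 == 0:
--                 seq = evens + [x - 1 for x in evens]
--             else:
--                 seq = evens + [2 * (half + 1) - x - 1 for x in evens]
--         else:
--             rev = [x * 2 for x in reversed(seq)]
--             seq = [o] + rev + [o - x for x in reversed(rev)]
--     return seq
--
-- def _numbering(faces):
--     if faces < 3:
--         return list(range(1, faces + 1))
--     if faces == 4:
--         return [4, 2, 1, 3]
--     if faces % 2 == 0:
--         s = _coreSequence(faces // 2)
--         return [x * 2 for x in s] + [faces - 2 * x + 1 for x in s]
--     return _coreSequence(faces)
--
-- def sequenceNumberBipyramidalDice(faces):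
--     if faces < 2:
--         return [0] * faces
--     seq = _numbering(faces)
--     if faces == 10:
--         seq = [0 if x == 10 else x for x in seq]
--     half = faces // 2
--     out = seq[:half + 1] + list(reversed(seq[half + 1:2 * half]))
--     if faces % 2 == 1:
--         out.append(0)
--     return out
-- ===== Notes on version B (the rewrite author's own statement) =====
-- stated objective: alternative
-- what changed: Replaces the recursive core that mutates a preallocated array by index with an iterative bottom-up rebuild over the precomputed halving chain using list concatenation, and replaces the outer position-reindexing loop by slice-and-reverse assembly.
import Mathlib
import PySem

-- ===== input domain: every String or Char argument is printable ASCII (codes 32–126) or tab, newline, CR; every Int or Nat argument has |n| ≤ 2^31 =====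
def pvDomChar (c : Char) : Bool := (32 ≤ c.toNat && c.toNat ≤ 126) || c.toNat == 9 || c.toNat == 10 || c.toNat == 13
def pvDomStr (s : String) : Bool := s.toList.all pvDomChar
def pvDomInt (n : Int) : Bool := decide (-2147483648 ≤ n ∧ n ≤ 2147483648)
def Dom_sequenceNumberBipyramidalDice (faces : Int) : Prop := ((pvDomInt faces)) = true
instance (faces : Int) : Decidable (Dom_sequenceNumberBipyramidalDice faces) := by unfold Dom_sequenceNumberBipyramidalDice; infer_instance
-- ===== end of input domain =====

-- B rebuilds the number sequence iteratively (bottom-up over the halving chain, by list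
-- concatenation) instead of A's recursion with index assignments into preallocated arrays;
-- an alternative decomposition of the same cost, proved to return the same list.


-- ===== PORT A =====

-- isEven(n)
def pvIsEven (n : Int) : Bool := PySem.Int.mod n 2 == 0

-- recursiveDiceNumberSequence(order).  math.trunc(order / 2) is PySem.Int.truncdiv order 2
-- (exact for |order| ≤ 2^31).  All list indices A uses are in range at A's call sites
-- (order ≥ 3), so in-range indexing is transliterated with List.getD/List.set.
-- The fuel argument (order.toNat suffices, since the order at least halves on each call) and
-- the 'order ≤ 2' guard are only for termination: Python recurses forever below 3 and A never
-- reaches that (every call has order ≥ 3, and the fuel is never exhausted — pvRecDiceF_congr).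
def pvRecDiceF : Nat → Int → List Int
  | 0, _ => []
  | fuel + 1, order =>
    if order = 3 then [3, 1, 2]
    else if order = 4 then [4, 1, 3, 2]
    else if order = 5 then [5, 1, 4, 2, 3]
    else if order ≤ 2 then []
    else
      let newOrder := PySem.Int.truncdiv order 2
      let recursiveSequence := pvRecDiceF fuel newOrder
      let numberSequence := List.replicate order.toNat (0 : Int)
      if pvIsEven order then
        (List.range newOrder.toNat).foldl (fun ns i =>
          let ns := ns.set i (recursiveSequence.getD i 0 * 2)
          if pvIsEven newOrder then
            ns.set (newOrder.toNat + i) (ns.getD i 0 - 1)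
          else
            ns.set (newOrder.toNat + i) ((newOrder - recursiveSequence.getD i 0 + 1) * 2 - 1))
          numberSequence
      else
        (List.range newOrder.toNat).foldl (fun ns i =>
          let ns := ns.set (i + 1) (recursiveSequence.getD (newOrder.toNat - i - 1) 0 * 2)
          ns.set (order.toNat - (i + 1)) (order - ns.getD (i + 1) 0))
          (numberSequence.set 0 order)

def pvRecDice (order : Int) : List Int := pvRecDiceF order.toNat order

-- diceNumberAlgorithmSequence(faces)
def pvDiceAlg (faces : Int) : List Int :=
  if faces < 3 then (List.range faces.toNat).map (fun i => ((i : Int) + 1))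
  else if faces = 4 then [4, 2, 1, 3]
  else if pvIsEven faces then
    let evenFaces := PySem.Int.truncdiv faces 2
    (List.range evenFaces.toNat).foldl (fun nso i =>
      let nso := nso.set i (nso.getD i 0 * 2)
      nso ++ [faces - nso.getD i 0 + 1]) (pvRecDice evenFaces)
  else pvRecDice faces

-- sequenceNumberBipyramidalDice(faces).  sequenceOrder.index(10) is PySem.List.index?;
-- the 'none' branch (Python ValueError) is unreachable: 10 ∈ pvDiceAlg 10.
def sequenceNumberBipyramidalDice (faces : Int) : List Int :=
  let sequenceOrder := pvDiceAlg faces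
  let sequenceOrder :=
    if faces = 10 then
      match PySem.List.index? sequenceOrder 10 with
      | some tenPosition => sequenceOrder.set tenPosition 0
      | none => sequenceOrder
    else sequenceOrder
  let polygonSides := PySem.Int.truncdiv faces 2
  (List.range polygonSides.toNat).foldl (fun bp i =>
    let bp := bp.set i (sequenceOrder.getD i 0)
    let position := PySem.Int.mod ((i : Int) * (-1)) polygonSides + polygonSides
    bp.set position.toNat (sequenceOrder.getD (i + polygonSides.toNat) 0))
    (List.replicate faces.toNat (0 : Int))

-- ===== PORT B =====

-- _coreSequence's while loop: the chain of orders halved down to the base case,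
-- returned together with the final (base) order.  The fuel (order.toNat suffices)
-- is only a termination guard, never exhausted from B's call sites (pvChainF_congr).
def pvChainF : Nat → Int → List Int × Int
  | 0, order => ([], order)
  | fuel + 1, order =>
    if 5 < order then
      let r := pvChainF fuel (PySem.Int.floordiv order 2)
      (order :: r.1, r.2)
    else ([], order)

def pvChain (order : Int) : List Int × Int := pvChainF order.toNat order

-- _BASE[order] (KeyError for other keys; unreachable from B's call sites, where order ∈ {3,4,5})
def pvBase (o : Int) : List Int :=
  if o = 3 then [3, 1, 2]
  else if o = 4 then [4, 1, 3, 2]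
  else if o = 5 then [5, 1, 4, 2, 3]
  else []

-- one step of _coreSequence's upward rebuild loop
def pvStep (seq : List Int) (o : Int) : List Int :=
  let half := PySem.Int.floordiv o 2
  let evens := seq.map (· * 2)
  if PySem.Int.mod o 2 == 0 then
    if PySem.Int.mod half 2 == 0 then evens ++ evens.map (· - 1)
    else evens ++ evens.map (fun x => 2 * (half + 1) - x - 1)
  else
    let rev := seq.reverse.map (· * 2)
    o :: (rev ++ rev.reverse.map (fun x => o - x))

-- _coreSequence(order): seed with the base list, fold the rebuild step over the chain upward
def pvCore (order : Int) : List Int :=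
  let c := pvChain order
  c.1.reverse.foldl pvStep (pvBase c.2)

-- _numbering(faces)
def pvNumbering (faces : Int) : List Int :=
  if faces < 3 then (List.range faces.toNat).map (fun i => ((i : Int) + 1))
  else if faces = 4 then [4, 2, 1, 3]
  else if PySem.Int.mod faces 2 == 0 then
    let s := pvCore (PySem.Int.floordiv faces 2)
    s.map (· * 2) ++ s.map (fun x => faces - 2 * x + 1)
  else pvCore faces

-- sequenceNumberBipyramidalDice(faces), B version: slice-and-reverse assembly
def sequenceNumberBipyramidalDice_alt (faces : Int) : List Int :=
  if faces < 2 then List.replicate faces.toNat (0 : Int)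
  else
    let seq := pvNumbering faces
    let seq := if faces = 10 then seq.map (fun x => if x == 10 then 0 else x) else seq
    let half := PySem.Int.floordiv faces 2
    let out := PySem.List.slice seq none (some (half + 1)) ++
               (PySem.List.slice seq (some (half + 1)) (some (2 * half))).reverse
    if PySem.Int.mod faces 2 == 1 then out ++ [0] else out

-- ===== PRECONDITION & SPEC =====
def Spec_sequenceNumberBipyramidalDice (faces : Int) (out : List Int) : Prop := out = sequenceNumberBipyramidalDice_alt faces
instance (faces : Int) (out : List Int) : Decidable (Spec_sequenceNumberBipyramidalDice faces out) := by unfold Spec_sequenceNumberBipyramidalDice; infer_instance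

-- ===== CLAIM (what is proved, stated in full; the proofs are below) =====
def Claim_equal_sequenceNumberBipyramidalDice : Prop := ∀ (faces : Int), Dom_sequenceNumberBipyramidalDice faces → Spec_sequenceNumberBipyramidalDice faces (sequenceNumberBipyramidalDice faces)

-- ===== LEMMAS AND PROOFS =====

theorem pvRecDiceF_congr (f : Nat) : ∀ (g : Nat) (order : Int),
    order.toNat ≤ f → order.toNat ≤ g → pvRecDiceF f order = pvRecDiceF g order := by
  induction f with
  | zero =>
    intro g order hf _
    cases g with
    | zero => rfl
    | succ g =>
      show [] = pvRecDiceF (g + 1) order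
      simp only [pvRecDiceF]
      rw [if_neg (by omega), if_neg (by omega), if_neg (by omega), if_pos (by omega)]
  | succ f ih =>
    intro g order hf hg
    cases g with
    | zero =>
      show pvRecDiceF (f + 1) order = []
      simp only [pvRecDiceF]
      rw [if_neg (by omega), if_neg (by omega), if_neg (by omega), if_pos (by omega)]
    | succ g =>
      simp only [pvRecDiceF]
      by_cases h3 : order = 3
      · simp [h3]
      by_cases h4 : order = 4
      · simp [h3, h4]
      by_cases h5 : order = 5
      · simp [h3, h4, h5]
      by_cases h2 : order ≤ 2
      · simp [h3, h4, h5, h2]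
      simp only [if_neg h3, if_neg h4, if_neg h5, if_neg h2]
      have htd : PySem.Int.truncdiv order 2 = order / 2 := by
        simp only [PySem.Int.truncdiv]; exact Int.tdiv_eq_ediv_of_nonneg (by omega)
      rw [ih g (PySem.Int.truncdiv order 2) (by rw [htd]; omega) (by rw [htd]; omega)]

theorem pvRecDice_unfold (order : Int) (h6 : 6 ≤ order) :
    pvRecDice order = pvRecDiceF (order.toNat + 1) order := by
  exact pvRecDiceF_congr order.toNat (order.toNat + 1) order (by omega) (by omega)

theorem pvChainF_congr (f : Nat) : ∀ (g : Nat) (order : Int),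
    order.toNat ≤ f → order.toNat ≤ g → pvChainF f order = pvChainF g order := by
  induction f with
  | zero =>
    intro g order hf _
    cases g with
    | zero => rfl
    | succ g =>
      show ([], order) = pvChainF (g + 1) order
      simp only [pvChainF]
      rw [if_neg (by omega)]
  | succ f ih =>
    intro g order hf hg
    cases g with
    | zero =>
      show pvChainF (f + 1) order = ([], order)
      simp only [pvChainF]
      rw [if_neg (by omega)]
    | succ g =>
      simp only [pvChainF]
      by_cases h5 : 5 < order
      · simp only [if_pos h5]
        have hfd : PySem.Int.floordiv order 2 = order / 2 :=
          PySem.Int.floordiv_eq_ediv_of_pos (by omega)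
        rw [ih g (PySem.Int.floordiv order 2) (by rw [hfd]; omega) (by rw [hfd]; omega)]
      · simp only [if_neg h5]

theorem pvCore_unfold (order : Int) (h6 : 6 ≤ order) :
    pvCore order = pvStep (pvCore (PySem.Int.floordiv order 2)) order := by
  have hfd : PySem.Int.floordiv order 2 = order / 2 :=
    PySem.Int.floordiv_eq_ediv_of_pos (by omega)
  have h1 : pvChain order = (order :: (pvChain (PySem.Int.floordiv order 2)).1,
      (pvChain (PySem.Int.floordiv order 2)).2) := by
    show pvChainF order.toNat order = _
    rw [pvChainF_congr order.toNat (order.toNat + 1) order (by omega) (by omega)]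
    simp only [pvChainF]
    rw [if_pos (by omega)]
    unfold pvChain
    rw [pvChainF_congr order.toNat (PySem.Int.floordiv order 2).toNat
      (PySem.Int.floordiv order 2) (by rw [hfd]; omega) (by omega)]
  unfold pvCore
  rw [h1]
  simp only [List.reverse_cons, List.foldl_append, List.foldl_cons, List.foldl_nil]

-- writing/reading one cell at a known offset in a concatenation
theorem pvSetAt (A B : List Int) (z v : Int) (n : Nat) (hA : A.length = n) :
    (A ++ z :: B).set n v = A ++ v :: B := by
  rw [List.set_append, if_neg (by omega)]
  simp [hA]

theorem pvGetAt (A B : List Int) (z : Int) (n : Nat) (hA : A.length = n) :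
    (A ++ z :: B).getD n 0 = z := by
  rw [List.getD_append_right _ _ _ _ (by omega)]
  simp [hA]

-- A's even-even inner loop, characterised as a concatenation.
theorem pvEvenEvenLoop (rs : List Int) (m k : Nat) (hrs : rs.length = m) (hk : k ≤ m) :
    (List.range k).foldl (fun ns i =>
        (ns.set i (rs.getD i 0 * 2)).set (m + i)
          ((ns.set i (rs.getD i 0 * 2)).getD i 0 - 1)) (List.replicate (2 * m) (0 : Int))
      = (rs.take k).map (fun x => x * 2) ++ List.replicate (m - k) 0 ++
        (rs.take k).map (fun x => x * 2 - 1) ++ List.replicate (m - k) 0 := by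
  induction k with
  | zero =>
    simp only [List.range_zero, List.foldl_nil, List.take_zero, List.map_nil, Nat.sub_zero,
      List.nil_append, List.append_nil, Nat.two_mul, List.replicate_add]
  | succ k ihk =>
    have hk' : k ≤ m := by omega
    have hkm : k < m := by omega
    rw [List.range_succ, List.foldl_append, ihk hk']
    simp only [List.foldl_cons, List.foldl_nil]
    have hF : ((rs.take k).map (fun x => x * 2)).length = k := by
      simp; omega
    have hmk : m - k = (m - k - 1) + 1 := by omega
    rw [hmk, List.replicate_succ]
    have e1 : (rs.take k).map (fun x => x * 2) ++ ((0 : Int) :: List.replicate (m - k - 1) 0) ++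
          (rs.take k).map (fun x => x * 2 - 1) ++ ((0 : Int) :: List.replicate (m - k - 1) 0)
        = (rs.take k).map (fun x => x * 2) ++ (0 : Int) :: (List.replicate (m - k - 1) 0 ++
          (rs.take k).map (fun x => x * 2 - 1) ++ (0 : Int) :: List.replicate (m - k - 1) 0) := by
      simp [List.append_assoc]
    rw [e1, pvSetAt _ _ _ _ _ hF, pvGetAt _ _ _ _ hF]
    have e2 : (rs.take k).map (fun x => x * 2) ++ (rs.getD k 0 * 2) :: (List.replicate (m - k - 1) 0 ++
          (rs.take k).map (fun x => x * 2 - 1) ++ (0 : Int) :: List.replicate (m - k - 1) 0)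
        = ((rs.take k).map (fun x => x * 2) ++ (rs.getD k 0 * 2) :: List.replicate (m - k - 1) 0 ++
          (rs.take k).map (fun x => x * 2 - 1)) ++ (0 : Int) :: List.replicate (m - k - 1) 0 := by
      simp [List.append_assoc]
    rw [e2, pvSetAt _ _ _ _ (m + k) (by simp [hF]; omega)]
    have htake : rs.take (k + 1) = rs.take k ++ [rs.getD k 0] := by
      rw [List.take_succ]
      congr 1
      rw [List.getD_eq_getElem _ _ (by omega)]
      simp [hkm, hrs]
    rw [htake]
    simp [List.append_assoc, Nat.sub_sub]

-- A's even-odd inner loop.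
theorem pvEvenOddLoop (rs : List Int) (m k : Nat) (n : Int) (hrs : rs.length = m) (hk : k ≤ m) :
    (List.range k).foldl (fun ns i =>
        (ns.set i (rs.getD i 0 * 2)).set (m + i)
          ((n - rs.getD i 0 + 1) * 2 - 1)) (List.replicate (2 * m) (0 : Int))
      = (rs.take k).map (fun x => x * 2) ++ List.replicate (m - k) 0 ++
        (rs.take k).map (fun x => (n - x + 1) * 2 - 1) ++ List.replicate (m - k) 0 := by
  induction k with
  | zero =>
    simp only [List.range_zero, List.foldl_nil, List.take_zero, List.map_nil, Nat.sub_zero,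
      List.nil_append, List.append_nil, Nat.two_mul, List.replicate_add]
  | succ k ihk =>
    have hk' : k ≤ m := by omega
    have hkm : k < m := by omega
    rw [List.range_succ, List.foldl_append, ihk hk']
    simp only [List.foldl_cons, List.foldl_nil]
    have hF : ((rs.take k).map (fun x => x * 2)).length = k := by
      simp; omega
    have hmk : m - k = (m - k - 1) + 1 := by omega
    rw [hmk, List.replicate_succ]
    have e1 : (rs.take k).map (fun x => x * 2) ++ ((0 : Int) :: List.replicate (m - k - 1) 0) ++
          (rs.take k).map (fun x => (n - x + 1) * 2 - 1) ++ ((0 : Int) :: List.replicate (m - k - 1) 0)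
        = (rs.take k).map (fun x => x * 2) ++ (0 : Int) :: (List.replicate (m - k - 1) 0 ++
          (rs.take k).map (fun x => (n - x + 1) * 2 - 1) ++ (0 : Int) :: List.replicate (m - k - 1) 0) := by
      simp [List.append_assoc]
    rw [e1, pvSetAt _ _ _ _ _ hF]
    have e2 : (rs.take k).map (fun x => x * 2) ++ (rs.getD k 0 * 2) :: (List.replicate (m - k - 1) 0 ++
          (rs.take k).map (fun x => (n - x + 1) * 2 - 1) ++ (0 : Int) :: List.replicate (m - k - 1) 0)
        = ((rs.take k).map (fun x => x * 2) ++ (rs.getD k 0 * 2) :: List.replicate (m - k - 1) 0 ++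
          (rs.take k).map (fun x => (n - x + 1) * 2 - 1)) ++ (0 : Int) :: List.replicate (m - k - 1) 0 := by
      simp [List.append_assoc]
    rw [e2, pvSetAt _ _ _ _ (m + k) (by simp [hF]; omega)]
    have htake : rs.take (k + 1) = rs.take k ++ [rs.getD k 0] := by
      rw [List.take_succ]
      congr 1
      rw [List.getD_eq_getElem _ _ (by omega)]
      simp [hkm, hrs]
    rw [htake]
    simp [List.append_assoc, Nat.sub_sub]

-- A's odd inner loop.
theorem pvOddLoop (rs : List Int) (m k : Nat) (o : Int) (hrs : rs.length = m)
    (hk : k ≤ m) :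
    (List.range k).foldl (fun ns i =>
        (ns.set (i + 1) (rs.getD (m - i - 1) 0 * 2)).set (2 * m + 1 - (i + 1))
          (o - (ns.set (i + 1) (rs.getD (m - i - 1) 0 * 2)).getD (i + 1) 0))
        (o :: List.replicate (2 * m) (0 : Int))
      = o :: ((List.range k).map (fun i => rs.getD (m - i - 1) 0 * 2) ++ List.replicate (2 * m - 2 * k) 0 ++
          (((List.range k).map (fun i => rs.getD (m - i - 1) 0 * 2)).map (fun x => o - x)).reverse) := by
  induction k with
  | zero => simp
  | succ k ihk =>
    have hk' : k ≤ m := by omega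
    have hkm : k < m := by omega
    rw [List.range_succ, List.foldl_append, ihk hk']
    simp only [List.foldl_cons, List.foldl_nil]
    have hE : ((List.range k).map (fun i => rs.getD (m - i - 1) 0 * 2)).length = k := by simp
    rw [show 2 * m - 2 * k = (2 * m - 2 * k - 1) + 1 from by omega, List.replicate_succ]
    rw [List.set_cons_succ]
    have e1 : (List.range k).map (fun i => rs.getD (m - i - 1) 0 * 2) ++
          ((0 : Int) :: List.replicate (2 * m - 2 * k - 1) 0) ++
          (((List.range k).map (fun i => rs.getD (m - i - 1) 0 * 2)).map (fun x => o - x)).reverse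
        = (List.range k).map (fun i => rs.getD (m - i - 1) 0 * 2) ++
          (0 : Int) :: (List.replicate (2 * m - 2 * k - 1) 0 ++
          (((List.range k).map (fun i => rs.getD (m - i - 1) 0 * 2)).map (fun x => o - x)).reverse) := by
      simp [List.append_assoc]
    rw [e1, pvSetAt _ _ _ _ _ hE]
    rw [List.getD_cons_succ, pvGetAt _ _ _ _ hE]
    rw [show 2 * m + 1 - (k + 1) = (2 * m - k - 1) + 1 from by omega, List.set_cons_succ]
    rw [show 2 * m - 2 * k - 1 = (2 * m - 2 * k - 2) + 1 from by omega, List.replicate_succ']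
    have e2 : (List.range k).map (fun i => rs.getD (m - i - 1) 0 * 2) ++
          (rs.getD (m - k - 1) 0 * 2) :: ((List.replicate (2 * m - 2 * k - 2) 0 ++ [(0 : Int)]) ++
          (((List.range k).map (fun i => rs.getD (m - i - 1) 0 * 2)).map (fun x => o - x)).reverse)
        = ((List.range k).map (fun i => rs.getD (m - i - 1) 0 * 2) ++
          (rs.getD (m - k - 1) 0 * 2) :: List.replicate (2 * m - 2 * k - 2) 0) ++
          (0 : Int) :: (((List.range k).map (fun i => rs.getD (m - i - 1) 0 * 2)).map (fun x => o - x)).reverse := by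
      simp [List.append_assoc]
    rw [e2, pvSetAt _ _ _ _ (2 * m - k - 1) (by simp; omega)]
    rw [show 2 * m - 2 * (k + 1) = 2 * m - 2 * k - 2 from by omega]
    simp [List.range_succ, List.append_assoc]

-- lengths of B's core
theorem pvCore_length (order : Int) (h : 3 ≤ order) : (pvCore order).length = order.toNat := by
  have H : ∀ n : Nat, ∀ order : Int, order.toNat ≤ n → 3 ≤ order →
      (pvCore order).length = order.toNat := by
    intro n
    induction n with
    | zero => intro order h0 h3; omega
    | succ n ih =>
      intro order hle h3
      by_cases h5 : order ≤ 5
      · have : order = 3 ∨ order = 4 ∨ order = 5 := by omega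
        rcases this with h' | h' | h' <;> subst h' <;> decide
      · have hfd : PySem.Int.floordiv order 2 = order / 2 :=
          PySem.Int.floordiv_eq_ediv_of_pos (by omega)
        have hrec := ih (PySem.Int.floordiv order 2) (by rw [hfd]; omega) (by rw [hfd]; omega)
        rw [hfd] at hrec
        have hm : PySem.Int.mod order 2 = order % 2 := PySem.Int.mod_eq_emod_of_pos (by omega)
        rw [pvCore_unfold order (by omega)]
        simp only [pvStep]
        split_ifs with h1 h2 <;>
          simp only [beq_iff_eq, hm] at h1 <;>
          simp [hrec, hfd] <;>
          omega
  exact H order.toNat order (le_refl _) h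

-- the two cores agree
theorem pvCore_eq (order : Int) (h : 3 ≤ order) : pvRecDice order = pvCore order := by
  have H : ∀ n : Nat, ∀ order : Int, order.toNat ≤ n → 3 ≤ order →
      pvRecDice order = pvCore order := by
    intro n
    induction n with
    | zero => intro order h0 h3; omega
    | succ n ih =>
      intro order hle h3
      by_cases h5 : order ≤ 5
      · have : order = 3 ∨ order = 4 ∨ order = 5 := by omega
        rcases this with h' | h' | h' <;> subst h' <;> decide
      · have h6 : 6 ≤ order := by omega
        have htd : PySem.Int.truncdiv order 2 = order / 2 := by
          simp only [PySem.Int.truncdiv]; exact Int.tdiv_eq_ediv_of_nonneg (by omega)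
        have hfd : PySem.Int.floordiv order 2 = order / 2 :=
          PySem.Int.floordiv_eq_ediv_of_pos (by omega)
        have h3' : 3 ≤ order / 2 := by omega
        have hlen : (pvCore (order / 2)).length = (order / 2).toNat := pvCore_length _ h3'
        have hcall : pvRecDiceF order.toNat (PySem.Int.truncdiv order 2) = pvCore (order / 2) := by
          rw [pvRecDiceF_congr order.toNat (PySem.Int.truncdiv order 2).toNat _
            (by rw [htd]; omega) (le_refl _)]
          show pvRecDice (PySem.Int.truncdiv order 2) = _
          rw [htd]
          exact ih (order / 2) (by omega) h3'
        rw [pvRecDice_unfold order h6]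
        simp only [pvRecDiceF]
        rw [if_neg (by omega), if_neg (by omega), if_neg (by omega), if_neg (by omega)]
        rw [hcall, pvCore_unfold order h6]
        simp only [pvStep, pvIsEven]
        rw [htd, hfd]
        by_cases hpar : PySem.Int.mod order 2 = 0
        · rw [if_pos (by simp only [beq_iff_eq]; exact hpar), if_pos (by simp only [beq_iff_eq]; exact hpar)]
          have hmod2 : PySem.Int.mod order 2 = order % 2 := PySem.Int.mod_eq_emod_of_pos (by omega)
          rw [show order.toNat = 2 * (order / 2).toNat from by omega]
          by_cases hpar2 : PySem.Int.mod (order / 2) 2 = 0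
          · simp only [show (PySem.Int.mod (order / 2) 2 == 0) = true from by simp only [beq_iff_eq]; exact hpar2,
              if_true]
            rw [pvEvenEvenLoop (pvCore (order / 2)) (order / 2).toNat (order / 2).toNat hlen
              (le_refl _)]
            rw [List.take_of_length_le (by omega)]
            simp [List.map_map, Function.comp, Nat.sub_self]
          · simp only [show (PySem.Int.mod (order / 2) 2 == 0) = false from by simp only [beq_eq_false_iff_ne, ne_eq]; exact hpar2,
              Bool.false_eq_true, if_false]
            rw [pvEvenOddLoop (pvCore (order / 2)) (order / 2).toNat (order / 2).toNat (order / 2)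
              hlen (le_refl _)]
            rw [List.take_of_length_le (by omega)]
            simp only [Nat.sub_self, List.replicate_zero, List.append_nil, List.nil_append,
              List.map_map]
            congr 1
            apply List.map_congr_left
            intro x _
            simp [Function.comp]
            ring
        · rw [if_neg (by simp only [beq_iff_eq]; exact hpar), if_neg (by simp only [beq_iff_eq]; exact hpar)]
          have hmod2 : PySem.Int.mod order 2 = order % 2 := PySem.Int.mod_eq_emod_of_pos (by omega)
          rw [show order.toNat = 2 * (order / 2).toNat + 1 from by omega]
          rw [List.replicate_succ, List.set_cons_zero]
          rw [pvOddLoop (pvCore (order / 2)) (order / 2).toNat (order / 2).toNat order hlen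
            (le_refl _)]
          have hE : (List.range (order / 2).toNat).map
                (fun i => (pvCore (order / 2)).getD ((order / 2).toNat - i - 1) 0 * 2)
              = (pvCore (order / 2)).reverse.map (fun x => x * 2) := by
            apply List.ext_getElem
            · simp [hlen]
            · intro i h1 h2
              simp only [List.getElem_map, List.getElem_range, List.getElem_reverse]
              rw [List.getD_eq_getElem _ _ (by simp at h1 ⊢; omega)]
              have hidx : (order / 2).toNat - i - 1 = (pvCore (order / 2)).length - 1 - i := by
                simp at h1; omega
              congr 1
              exact getElem_congr rfl hidx (by simp at h1 ⊢; omega)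
          rw [hE]
          simp [List.map_reverse, Nat.sub_self]
  exact H order.toNat order (le_refl _) h

-- diceNumberAlgorithmSequence's even loop
theorem pvAlgLoop (rs : List Int) (k : Nat) (faces : Int) (hk : k ≤ rs.length) :
    (List.range k).foldl (fun nso i =>
        nso.set i (nso.getD i 0 * 2) ++
          [faces - (nso.set i (nso.getD i 0 * 2)).getD i 0 + 1]) rs
      = (rs.take k).map (fun x => x * 2) ++ rs.drop k ++
        (rs.take k).map (fun x => faces - x * 2 + 1) := by
  induction k with
  | zero => simp
  | succ k ihk =>
    have hk' : k ≤ rs.length := by omega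
    have hkm : k < rs.length := by omega
    rw [List.range_succ, List.foldl_append, ihk hk']
    simp only [List.foldl_cons, List.foldl_nil]
    have hF : ((rs.take k).map (fun x => x * 2)).length = k := by simp; omega
    rw [List.drop_eq_getElem_cons hkm]
    have e1 : (rs.take k).map (fun x => x * 2) ++ (rs[k] :: rs.drop (k + 1)) ++
          (rs.take k).map (fun x => faces - x * 2 + 1)
        = (rs.take k).map (fun x => x * 2) ++ rs[k] :: (rs.drop (k + 1) ++
          (rs.take k).map (fun x => faces - x * 2 + 1)) := by
      simp only [List.append_assoc, List.cons_append]
    rw [e1, pvGetAt _ _ _ _ hF, pvSetAt _ _ _ _ _ hF, pvGetAt _ _ _ _ hF]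
    have htake : rs.take (k + 1) = rs.take k ++ [rs[k]] := by
      rw [List.take_succ]; simp [hkm]
    rw [htake]
    simp only [List.map_append, List.map_cons, List.map_nil, List.append_assoc,
      List.cons_append, List.nil_append, List.append_nil]

-- the two numbering sequences agree (above the small decided cases)
theorem pvNumbering_eq (faces : Int) (h : 11 ≤ faces) : pvDiceAlg faces = pvNumbering faces := by
  have htd : PySem.Int.truncdiv faces 2 = faces / 2 := by
    simp only [PySem.Int.truncdiv]; exact Int.tdiv_eq_ediv_of_nonneg (by omega)
  have hfd : PySem.Int.floordiv faces 2 = faces / 2 :=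
    PySem.Int.floordiv_eq_ediv_of_pos (by omega)
  simp only [pvDiceAlg, pvNumbering, pvIsEven]
  rw [if_neg (show ¬faces < 3 from by omega), if_neg (show ¬faces = 4 from by omega),
    if_neg (show ¬faces < 3 from by omega), if_neg (show ¬faces = 4 from by omega)]
  rw [htd, hfd]
  by_cases hpar : PySem.Int.mod faces 2 = 0
  · rw [if_pos (by simp only [beq_iff_eq]; exact hpar),
      if_pos (by simp only [beq_iff_eq]; exact hpar)]
    rw [pvCore_eq (faces / 2) (by omega)]
    have hlen : (pvCore (faces / 2)).length = (faces / 2).toNat := pvCore_length _ (by omega)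
    rw [show (faces / 2).toNat = (pvCore (faces / 2)).length from hlen.symm]
    rw [pvAlgLoop (pvCore (faces / 2)) (pvCore (faces / 2)).length faces (le_refl _)]
    rw [List.take_length, List.drop_length]
    simp only [List.append_nil, List.nil_append]
    congr 1
    apply List.map_congr_left
    intro x _
    ring
  · rw [if_neg (by simp only [beq_iff_eq]; exact hpar),
      if_neg (by simp only [beq_iff_eq]; exact hpar)]
    exact pvCore_eq faces (by omega)

theorem pvNumbering_length (faces : Int) (h : 11 ≤ faces) :
    (pvNumbering faces).length = faces.toNat := by
  have hfd : PySem.Int.floordiv faces 2 = faces / 2 :=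
    PySem.Int.floordiv_eq_ediv_of_pos (by omega)
  have hmod2 : PySem.Int.mod faces 2 = faces % 2 := PySem.Int.mod_eq_emod_of_pos (by omega)
  simp only [pvNumbering]
  rw [if_neg (show ¬faces < 3 from by omega), if_neg (show ¬faces = 4 from by omega)]
  by_cases hpar : PySem.Int.mod faces 2 = 0
  · rw [if_pos (by simp only [beq_iff_eq]; exact hpar), hfd]
    have hlen : (pvCore (faces / 2)).length = (faces / 2).toNat := pvCore_length _ (by omega)
    simp [hlen]
    rw [hmod2] at hpar
    omega
  · rw [if_neg (by simp only [beq_iff_eq]; exact hpar)]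
    rw [pvCore_length _ (by omega)]

-- writing one cell inside a zero block of a concatenation
theorem pvSetInReplicate (A B : List Int) (v : Int) (n m j idx : Nat) (hA : A.length = n)
    (hj : j < m) (hidx : idx = n + j) :
    (A ++ (List.replicate m (0 : Int) ++ B)).set idx v
      = A ++ (List.replicate j (0 : Int) ++ (v :: (List.replicate (m - j - 1) (0 : Int) ++ B))) := by
  have hm : List.replicate m (0 : Int) = List.replicate j 0 ++ (0 : Int) :: List.replicate (m - j - 1) 0 := by
    rw [← List.replicate_succ, ← List.replicate_add]
    congr 1
    omega
  rw [hm, hidx]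
  have e : A ++ (List.replicate j (0 : Int) ++ (0 : Int) :: List.replicate (m - j - 1) 0 ++ B)
      = (A ++ List.replicate j (0 : Int)) ++ (0 : Int) :: (List.replicate (m - j - 1) 0 ++ B) := by
    simp only [List.append_assoc, List.cons_append]
  rw [e, pvSetAt _ _ _ _ _ (by simp [hA])]
  simp only [List.append_assoc]

-- the outer bipyramidal re-indexing loop
theorem pvBipyrLoop (so : List Int) (p : Int) (P k : Nat) (hp : p.toNat = P) (hP : 1 ≤ P)
    (hk : 1 ≤ k) (hkP : k ≤ P) (r : Nat) (hr : r ≤ 1) (hlen : so.length = 2 * P + r) :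
    (List.range k).foldl (fun bp (i : Nat) =>
        (bp.set i (so.getD i 0)).set (PySem.Int.mod ((i : Int) * (-1)) p + p).toNat
          (so.getD (i + P) 0)) (List.replicate (2 * P + r) (0 : Int))
      = so.take k ++ List.replicate (P - k) 0 ++ [so.getD P 0] ++ List.replicate (P - k) 0 ++
        ((so.drop (P + 1)).take (k - 1)).reverse ++ List.replicate r 0 := by
  have hp : p = (P : Int) := by omega
  induction k with
  | zero => omega
  | succ k ihk =>
    have hmod : ∀ j : Nat, 1 ≤ j → j < P → PySem.Int.mod ((j : Int) * (-1)) p + p = ((2 * P - j : Nat) : Int) := by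
      intro j hj1 hjP
      rw [PySem.Int.mod_eq_emod_of_pos (by omega)]
      rw [show ((j : Int) * (-1)) = (p - j) + p * (-1) from by ring, Int.add_mul_emod_self_left,
        Int.emod_eq_of_lt (by omega) (by omega)]
      omega
    by_cases hk0 : k = 0
    · subst hk0
      simp only [Nat.zero_add, List.range_one, List.foldl_cons, List.foldl_nil]
      have e0 : List.replicate (2 * P + r) (0 : Int) = [] ++ (List.replicate (2 * P + r) (0 : Int) ++ []) := by
        simp
      rw [e0, pvSetInReplicate [] _ (so.getD 0 0) 0 (2 * P + r) 0 0 rfl (by omega) rfl]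
      have hmod0 : PySem.Int.mod (((0 : Nat) : Int) * (-1)) p + p = (P : Int) := by
        rw [PySem.Int.mod_eq_emod_of_pos (by omega)]
        simp [hp]
      rw [hmod0]
      simp only [Nat.sub_zero, List.replicate_zero, List.nil_append, Int.toNat_natCast]
      have e1 : (so.getD 0 0) :: (List.replicate (2 * P + r - 1) (0 : Int) ++ [])
          = [so.getD 0 0] ++ (List.replicate (2 * P + r - 1) (0 : Int) ++ []) := rfl
      rw [e1, pvSetInReplicate [so.getD 0 0] [] (so.getD P 0) 1 (2 * P + r - 1) (P - 1) P
        rfl (by omega) (by omega)]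
      have htake1 : so.take 1 = [so.getD 0 0] := by
        rw [List.take_succ, List.getD_eq_getElem _ _ (by omega), List.getElem?_eq_getElem (by omega)]
        simp
      rw [show 2 * P + r - 1 - (P - 1) - 1 = P - 1 + r from by omega, List.replicate_add, htake1]
      simp [List.append_assoc, Nat.zero_add]
    · have hk1 : 1 ≤ k := by omega
      rw [List.range_succ, List.foldl_append, ihk hk1 (by omega)]
      simp only [List.foldl_cons, List.foldl_nil]
      have eS : so.take k ++ List.replicate (P - k) (0 : Int) ++ [so.getD P 0] ++
            List.replicate (P - k) (0 : Int) ++ ((so.drop (P + 1)).take (k - 1)).reverse ++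
            List.replicate r 0
          = so.take k ++ (List.replicate (P - k) (0 : Int) ++ ([so.getD P 0] ++
            (List.replicate (P - k) (0 : Int) ++ (((so.drop (P + 1)).take (k - 1)).reverse ++
            List.replicate r 0)))) := by
        simp only [List.append_assoc]
      rw [eS, pvSetInReplicate (so.take k) _ (so.getD k 0) k (P - k) 0 k (by simp; omega) (by omega)
        (by omega)]
      simp only [List.replicate_zero, List.nil_append, Nat.sub_zero]
      rw [hmod k hk1 (by omega)]
      simp only [Int.toNat_natCast]
      have e2 : so.take k ++ (so.getD k 0) :: (List.replicate (P - k - 1) (0 : Int) ++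
            ([so.getD P 0] ++ (List.replicate (P - k) (0 : Int) ++
              (((so.drop (P + 1)).take (k - 1)).reverse ++ List.replicate r 0))))
          = (so.take k ++ (so.getD k 0) :: (List.replicate (P - k - 1) (0 : Int) ++ [so.getD P 0])) ++
            (List.replicate (P - k) (0 : Int) ++
              (((so.drop (P + 1)).take (k - 1)).reverse ++ List.replicate r 0)) := by
        simp only [List.append_assoc, List.cons_append]
      rw [e2, pvSetInReplicate _ _ (so.getD (k + P) 0) (P + 1) (P - k) (P - k - 1) (2 * P - k)
        (by simp; omega) (by omega) (by omega)]
      have hrev : ((so.drop (P + 1)).take k).reverse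
          = so.getD (k + P) 0 :: ((so.drop (P + 1)).take (k - 1)).reverse := by
        have hlt : k - 1 < (so.drop (P + 1)).length := by simp [hlen]; omega
        rw [show k = (k - 1) + 1 from by omega, List.take_succ, List.getElem?_eq_getElem hlt]
        rw [List.getD_eq_getElem _ _ (show k - 1 + 1 + P < so.length from by omega)]
        simp [List.getElem_drop, show P + 1 + (k - 1) = k - 1 + 1 + P from by omega]
      have htake : so.take (k + 1) = so.take k ++ [so.getD k 0] := by
        rw [List.take_succ, List.getD_eq_getElem _ _ (by omega), List.getElem?_eq_getElem (by omega)]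
        rfl
      rw [show P - (k + 1) = P - k - 1 from by omega, show k + 1 - 1 = k from rfl, hrev, htake]
      rw [show P - k - (P - k - 1) - 1 = 0 from by omega]
      simp only [List.replicate_zero, List.nil_append, List.append_assoc, List.cons_append,
        List.singleton_append]

theorem pvMain_big (faces : Int) (h : 11 ≤ faces) :
    sequenceNumberBipyramidalDice faces = sequenceNumberBipyramidalDice_alt faces := by
  have htd : PySem.Int.truncdiv faces 2 = faces / 2 := by
    simp only [PySem.Int.truncdiv]; exact Int.tdiv_eq_ediv_of_nonneg (by omega)
  have hfd : PySem.Int.floordiv faces 2 = faces / 2 :=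
    PySem.Int.floordiv_eq_ediv_of_pos (by omega)
  have hmod2 : PySem.Int.mod faces 2 = faces % 2 := PySem.Int.mod_eq_emod_of_pos (by omega)
  have hnum : pvDiceAlg faces = pvNumbering faces := pvNumbering_eq faces h
  have hlen : (pvNumbering faces).length = faces.toNat := pvNumbering_length faces h
  simp only [sequenceNumberBipyramidalDice, sequenceNumberBipyramidalDice_alt,
    if_neg (show ¬faces = 10 from by omega), if_neg (show ¬faces < 2 from by omega)]
  rw [hnum, htd, hfd]
  rw [show faces.toNat = 2 * (faces / 2).toNat + (faces.toNat - 2 * (faces / 2).toNat) from by omega]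
  rw [pvBipyrLoop (pvNumbering faces) (faces / 2) (faces / 2).toNat (faces / 2).toNat rfl
    (by omega) (by omega) (le_refl _) (faces.toNat - 2 * (faces / 2).toNat) (by omega)
    (by rw [hlen]; omega)]
  rw [show PySem.List.slice (pvNumbering faces) none (some (faces / 2 + 1))
      = (pvNumbering faces).take (faces / 2 + 1).toNat from
    PySem.List.slice_to _ (by omega)]
  rw [show PySem.List.slice (pvNumbering faces) (some (faces / 2 + 1)) (some (2 * (faces / 2)))
      = ((pvNumbering faces).drop (faces / 2 + 1).toNat).take
          ((2 * (faces / 2)).toNat - (faces / 2 + 1).toNat) from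
    PySem.List.slice_toNat _ (by omega) (by omega)]
  rw [show (faces / 2 + 1).toNat = (faces / 2).toNat + 1 from by omega,
    show (2 * (faces / 2)).toNat = 2 * (faces / 2).toNat from by omega]
  have htake : (pvNumbering faces).take ((faces / 2).toNat + 1)
      = (pvNumbering faces).take ((faces / 2).toNat) ++ [(pvNumbering faces).getD ((faces / 2).toNat) 0] := by
    rw [List.take_succ, List.getD_eq_getElem _ _ (by rw [hlen]; omega),
      List.getElem?_eq_getElem (by rw [hlen]; omega)]
    rfl
  rw [show 2 * (faces / 2).toNat - ((faces / 2).toNat + 1) = (faces / 2).toNat - 1 from by omega,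
    htake]
  by_cases hpar : faces % 2 = 0
  · rw [if_neg (by simp only [beq_iff_eq, hmod2]; omega)]
    rw [show faces.toNat - 2 * (faces / 2).toNat = 0 from by omega]
    simp [List.append_assoc, Nat.sub_self]
  · rw [if_pos (by simp only [beq_iff_eq, hmod2]; omega)]
    rw [show faces.toNat - 2 * (faces / 2).toNat = 1 from by omega]
    simp [List.append_assoc, Nat.sub_self]

theorem pvMain_nonpos (faces : Int) (h : faces ≤ 0) :
    sequenceNumberBipyramidalDice faces = sequenceNumberBipyramidalDice_alt faces := by
  simp only [sequenceNumberBipyramidalDice, sequenceNumberBipyramidalDice_alt,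
    if_neg (show ¬faces = 10 from by omega), if_pos (show faces < 2 from by omega)]
  have h0 : (PySem.Int.truncdiv faces 2).toNat = 0 := by
    simp only [PySem.Int.truncdiv]
    have h1 : faces.tdiv 2 = -((-faces).tdiv 2) := by rw [Int.neg_tdiv, neg_neg]
    rw [h1, Int.tdiv_eq_ediv_of_nonneg (by omega)]
    omega
  rw [h0]
  simp

-- ===== VERDICT (by name: the statement is the Claim_ definition above) =====
theorem sequenceNumberBipyramidalDice_spec : Claim_equal_sequenceNumberBipyramidalDice := by
  intro faces _
  unfold Spec_sequenceNumberBipyramidalDice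
  by_cases h : faces ≤ 0
  · exact pvMain_nonpos faces h
  · by_cases h2 : faces < 11
    · have h1 : 1 ≤ faces := by omega
      have h3 : faces ≤ 10 := by omega
      interval_cases faces <;> decide
    · exact pvMain_big faces (by omega)
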